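-- pv_equiv track=rewrite | github.com/SulRash/NeMo-Aligner | nemo_aligner/utils/deep_search/mcts/search_db.py | _get_trailing_padding
-- ===== SOURCE A (Python) =====
-- def _get_trailing_padding(tokens):
--     counts = 0
--     for token in tokens[::-1]:
--         if token == 0:
--             counts += 1
--         else:
--             break
--     return counts
-- ===== SOURCE B (Python) =====
-- def _get_trailing_padding(tokens):
--     counts = 0
--     for token in tokens:
--         if token == 0:
--             counts += 1
--         else:
--             counts = 0
--     return counts
-- ===== Notes on version B (the rewrite author's own statement) =====
-- stated objective: alternative
-- what changed: B replaces A's reverse-slice-and-break scan with a single forward pass maintaining a run counter that resets on each nonzero token.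
import Mathlib
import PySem

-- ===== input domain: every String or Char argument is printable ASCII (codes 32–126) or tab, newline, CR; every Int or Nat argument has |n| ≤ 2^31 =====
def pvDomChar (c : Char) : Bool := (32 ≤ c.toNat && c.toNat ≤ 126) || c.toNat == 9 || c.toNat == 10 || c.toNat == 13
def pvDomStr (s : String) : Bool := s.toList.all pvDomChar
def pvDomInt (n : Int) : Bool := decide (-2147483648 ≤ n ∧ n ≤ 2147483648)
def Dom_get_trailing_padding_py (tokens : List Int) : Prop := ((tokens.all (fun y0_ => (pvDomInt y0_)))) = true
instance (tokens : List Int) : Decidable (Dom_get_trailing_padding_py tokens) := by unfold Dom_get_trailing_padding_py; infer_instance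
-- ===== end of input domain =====

-- B replaces A's reverse-and-break scan with a single forward pass keeping a run counter that resets on nonzero tokens (alternative decomposition, same cost).


-- ===== PORT A =====
-- for token in tokens[::-1]: if token == 0: counts += 1 else: break
def pvLoopA : List Int → Int
  | [] => 0
  | t :: ts => if t = 0 then pvLoopA ts + 1 else 0

def get_trailing_padding_py (tokens : List Int) : Int :=
  match PySem.List.slice? tokens none none (-1) with
  | some rev => pvLoopA rev
  | none => 0

-- ===== PORT B =====
-- B: one forward pass; run counter resets to 0 on a nonzero token
def get_trailing_padding_py_alt (tokens : List Int) : Int :=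
  tokens.foldl (fun counts t => if t = 0 then counts + 1 else 0) 0

-- ===== PRECONDITION & SPEC =====
def Spec_get_trailing_padding_py (tokens : List Int) (out : Int) : Prop := out = get_trailing_padding_py_alt tokens
instance (tokens : List Int) (out : Int) : Decidable (Spec_get_trailing_padding_py tokens out) := by unfold Spec_get_trailing_padding_py; infer_instance

-- ===== CLAIM (what is proved, stated in full; the proofs are below) =====
def Claim_equal_get_trailing_padding_py : Prop := ∀ (tokens : List Int), Dom_get_trailing_padding_py tokens → Spec_get_trailing_padding_py tokens (get_trailing_padding_py tokens)

-- ===== LEMMAS AND PROOFS =====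

-- ===== VERDICT (by name: the statement is the Claim_ definition above) =====
theorem pvFoldl_snoc (ts : List Int) (t : Int) (a : Int) :
    (ts ++ [t]).foldl (fun counts t => if t = 0 then counts + 1 else 0) a
      = if t = 0 then ts.foldl (fun counts t => if t = 0 then counts + 1 else 0) a + 1 else 0 := by
  simp [List.foldl_append]

theorem pvMain (ts : List Int) :
    ts.foldl (fun counts t => if t = 0 then counts + 1 else 0) 0 = pvLoopA ts.reverse := by
  induction ts using List.reverseRecOn with
  | nil => simp [pvLoopA]
  | append_singleton ts t ih =>
      rw [pvFoldl_snoc, List.reverse_append]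
      simp [pvLoopA, ih]

theorem get_trailing_padding_py_spec : Claim_equal_get_trailing_padding_py := by
  intro tokens _
  unfold Spec_get_trailing_padding_py get_trailing_padding_py get_trailing_padding_py_alt
  rw [PySem.List.slice?_none_none_neg_one, pvMain]
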